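-- pv_equiv track=rewrite | github.com/ckoons/BubbleSpacetimeTheory | play/toy_896_diffgeom_topology_bridge.py | chern_classes_quadric
-- ===== SOURCE A (Python) =====
-- from math import factorial, comb
--
-- def chern_classes_quadric(dim):
--     """
--     Total Chern class of Q^n ⊂ CP^{n+1}.
--
--     The tangent bundle of Q^n satisfies:
--       TQ^n ⊕ O(0) = (n+2) × O(1)|_{Q^n}
--     (restriction of hyperplane bundle)
--
--     Actually, for the quadric Q^n ⊂ CP^{n+1}:
--       c(TQ^n) = (1 + h)^{n+2} / (1 + 2h)
--     where h is the hyperplane class restricted to Q^n, and h^{n+1} = 0 on Q^n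
--     but h^n ≠ 0 (degree of Q^n in CP^{n+1} is 2, so h^n pairs to 2 on Q^n).
--
--     Actually, let's use the adjunction sequence:
--       0 → TQ^n → TCP^{n+1}|_{Q^n} → N_{Q^n/CP^{n+1}} → 0
--     where N = O(2)|_{Q^n} (Q^n is a degree 2 hypersurface).
--
--     So c(TQ^n) = c(TCP^{n+1}|_{Q^n}) / c(N)
--               = (1+h)^{n+2} / (1+2h)
--
--     Expand using geometric series: 1/(1+2h) = 1 - 2h + 4h² - 8h³ + ...
--     """
--     # We work modulo h^{n+1} (but h^n has self-intersection 2 on Q^n)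
--     # Compute c(TQ^n) = (1+h)^{n+2} × (1 - 2h + 4h² - ...)
--
--     # First compute (1+h)^{n+2} coefficients
--     binom_coeffs = [comb(dim + 2, k) for k in range(dim + 1)]
--
--     # Then multiply by 1/(1+2h) = sum_{j>=0} (-2)^j h^j
--     inv_coeffs = [(-2)**j for j in range(dim + 1)]
--
--     # Convolve
--     chern = []
--     for k in range(dim + 1):
--         ck = 0
--         for j in range(k + 1):
--             ck += binom_coeffs[j] * inv_coeffs[k - j]
--         chern.append(ck)
--
--     return chern  # chern[k] = c_k(TQ^n) as a multiple of h^k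
-- ===== SOURCE B (Python) =====
-- from math import comb
--
-- def chern_classes_quadric(dim):
--     # c_0 = 1; c_k = -2*c_{k-1} + C(dim+2, k), with the binomial kept by the
--     # multiplicative Pascal step b_k = b_{k-1}*(dim+3-k)//k  -- one O(n) pass.
--     if dim < 0:
--         return []
--     chern = [1]
--     c = 1
--     b = 1
--     for k in range(1, dim + 1):
--         b = b * (dim + 3 - k) // k
--         c = -2 * c + b
--         chern.append(c)
--     return chern
-- ===== Notes on version B (the rewrite author's own statement) =====
-- stated objective: faster
-- what changed: Replaced the O(n^2) convolution of precomputed binomial and geometric-series coefficient lists by a single O(n) pass using the linear recurrence c_k = -2*c_{k-1} + C(dim+2,k), with the binomial maintained by the multiplicative Pascal step b_k = b_{k-1}*(dim+3-k)//k.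
import Mathlib
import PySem

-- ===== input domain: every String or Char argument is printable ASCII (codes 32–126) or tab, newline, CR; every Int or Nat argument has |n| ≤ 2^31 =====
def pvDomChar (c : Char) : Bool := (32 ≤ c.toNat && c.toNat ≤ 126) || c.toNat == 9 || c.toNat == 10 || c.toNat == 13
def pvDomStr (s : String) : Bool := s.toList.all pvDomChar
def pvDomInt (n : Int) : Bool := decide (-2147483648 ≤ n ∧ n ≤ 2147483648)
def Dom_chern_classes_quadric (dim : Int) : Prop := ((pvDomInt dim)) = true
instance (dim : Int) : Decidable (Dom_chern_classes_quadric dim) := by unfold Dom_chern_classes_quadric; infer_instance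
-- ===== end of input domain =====

-- B replaces A's O(n^2) polynomial convolution by the one-pass linear recurrence
-- c_k = -2*c_{k-1} + C(dim+2, k), with the binomial maintained multiplicatively.


-- ===== PORT A =====
def chern_classes_quadric (dim : Int) : List Int :=
  let binom_coeffs : List Int :=
    (PySem.List.pyRange 0 (dim + 1) 1).map (fun k => ((dim + 2).toNat.choose k.toNat : Int))
  let inv_coeffs : List Int :=
    (PySem.List.pyRange 0 (dim + 1) 1).map (fun j => (-2 : Int) ^ j.toNat)
  (PySem.List.pyRange 0 (dim + 1) 1).foldl
    (fun chern k =>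
      chern ++ [(PySem.List.pyRange 0 (k + 1) 1).foldl
        (fun ck j => ck + PySem.List.pyGetD binom_coeffs j 0 * PySem.List.pyGetD inv_coeffs (k - j) 0) 0])
    []

-- ===== PORT B =====
def chern_classes_quadric_alt (dim : Int) : List Int :=
  if dim < 0 then []
  else
    ((PySem.List.pyRange 1 (dim + 1) 1).foldl
      (fun (st : List Int × Int × Int) k =>
        let b := PySem.Int.floordiv (st.2.2 * (dim + 3 - k)) k
        let c := -2 * st.2.1 + b
        (st.1 ++ [c], c, b))
      ([1], 1, 1)).1

-- ===== PRECONDITION & SPEC =====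
def Spec_chern_classes_quadric (dim : Int) (out : List Int) : Prop := out = chern_classes_quadric_alt dim
instance (dim : Int) (out : List Int) : Decidable (Spec_chern_classes_quadric dim out) := by unfold Spec_chern_classes_quadric; infer_instance

-- ===== CLAIM (what is proved, stated in full; the proofs are below) =====
def Claim_equal_chern_classes_quadric : Prop := ∀ (dim : Int), Dom_chern_classes_quadric dim → Spec_chern_classes_quadric dim (chern_classes_quadric dim)

-- ===== LEMMAS AND PROOFS =====

-- the common reference value: c_0 = 1, c_{k+1} = -2 c_k + C(n+2, k+1)
def pvConv (n : Nat) : Nat → Int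
  | 0 => 1
  | k + 1 => -2 * pvConv n k + ((n + 2).choose (k + 1) : Int)

-- the convolution A computes satisfies the recurrence
lemma pvConv_eq_sum (n k : Nat) :
    ((List.range (k + 1)).map
      (fun j => ((n + 2).choose j : Int) * (-2) ^ (k - j))).sum = pvConv n k := by
  induction k with
  | zero => simp [pvConv]
  | succ k ih =>
    rw [List.range_succ, List.map_append, List.sum_append]
    have hmap : (List.range (k + 1)).map
        (fun j => ((n + 2).choose j : Int) * (-2) ^ (k + 1 - j))
        = (List.range (k + 1)).map
        (fun j => (-2) * (((n + 2).choose j : Int) * (-2) ^ (k - j))) := by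
      apply List.map_congr_left
      intro j hj
      have hjk : j ≤ k := by simpa [Nat.lt_succ_iff] using List.mem_range.mp hj
      have : k + 1 - j = (k - j) + 1 := by omega
      rw [this, pow_succ]
      ring
    rw [hmap, List.sum_map_mul_left, ih]
    simp only [pvConv, List.map_singleton, List.sum_singleton]
    simp

-- A's result, for nonnegative dimension
lemma portA_eq (n : Nat) :
    chern_classes_quadric (n : Int) = (List.range (n + 1)).map (fun k => pvConv n k) := by
  unfold chern_classes_quadric
  simp only
  rw [show ((n : Int) + 1) = ((n + 1 : Nat) : Int) by push_cast; ring,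
    PySem.List.pyRange_zero_nat (n + 1)]
  rw [PySem.List.foldl_append_singleton_eq_map]
  rw [List.map_map, List.nil_append]
  apply List.map_congr_left
  intro k hk
  have hkn : k ≤ n := by simpa [Nat.lt_succ_iff] using List.mem_range.mp hk
  simp only [Function.comp]
  rw [PySem.List.foldl_add]
  rw [show ((k : Int) + 1) = ((k + 1 : Nat) : Int) by push_cast; ring,
    PySem.List.pyRange_zero_nat (k + 1)]
  rw [List.map_map, zero_add, ← pvConv_eq_sum n k]
  apply congrArg
  apply List.map_congr_left
  intro j hj
  have hjk : j ≤ k := by simpa [Nat.lt_succ_iff] using List.mem_range.mp hj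
  simp only [Function.comp]
  rw [show ((k : Int) - (j : Int)) = ((k - j : Nat) : Int) by
    have := Nat.cast_sub (R := Int) hjk; omega]
  rw [← PySem.List.pyRange_zero_nat (n + 1)]
  rw [PySem.List.pyGetD_map_pyRange _ (n + 1) j _ (by omega),
    PySem.List.pyGetD_map_pyRange _ (n + 1) (k - j) _ (by omega)]
  have h1 : ((n : Int) + 2).toNat = n + 2 := by omega
  simp [h1]

-- B's loop invariant: after processing k = 1..m the state is
-- (the first m+1 Chern coefficients, c_m, C(n+2, m))
lemma portB_invariant (n : Nat) (m : Nat) (hm : m ≤ n) :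
    (PySem.List.pyRange 1 ((m : Int) + 1) 1).foldl
      (fun (st : List Int × Int × Int) k =>
        let b := PySem.Int.floordiv (st.2.2 * ((n : Int) + 3 - k)) k
        let c := -2 * st.2.1 + b
        (st.1 ++ [c], c, b))
      ([1], 1, 1)
    = ((List.range (m + 1)).map (fun k => pvConv n k), pvConv n m, ((n + 2).choose m : Int)) := by
  induction m with
  | zero =>
    rw [PySem.List.pyRange_one_eq_nil (by norm_num)]
    simp [pvConv]
  | succ m ih =>
    have hm' : m ≤ n := by omega
    rw [show (((m + 1 : Nat) : Int) + 1) = ((m : Int) + 1) + 1 by push_cast; ring]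
    rw [PySem.List.pyRange_one_succ_right (by omega)]
    rw [List.foldl_append, ih hm']
    simp only [List.foldl_cons, List.foldl_nil]
    have hb : PySem.Int.floordiv (((n + 2).choose m : Int) * ((n : Int) + 3 - ((m : Int) + 1)))
        ((m : Int) + 1) = ((n + 2).choose (m + 1) : Int) := by
      have hsub : ((n : Int) + 3 - ((m : Int) + 1)) = ((n + 2 - m : Nat) : Int) := by
        have := Nat.cast_sub (R := Int) (show m ≤ n + 2 by omega); omega
      have hmul : (n + 2).choose m * (n + 2 - m) = (n + 2).choose (m + 1) * (m + 1) := by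
        rw [← Nat.choose_succ_right_eq]
      rw [hsub, show ((m : Int) + 1) = ((m + 1 : Nat) : Int) by push_cast; ring]
      rw [show (((n + 2).choose m : Int) * ((n + 2 - m : Nat) : Int))
          = (((n + 2).choose m * (n + 2 - m) : Nat) : Int) by push_cast; ring]
      rw [hmul, PySem.Int.floordiv_natCast]
      rw [Nat.mul_div_cancel _ (by omega)]
    simp only [hb]
    conv_rhs => rw [List.range_succ]
    rw [List.map_append]
    simp [pvConv]

lemma portB_eq (n : Nat) :
    chern_classes_quadric_alt (n : Int) = (List.range (n + 1)).map (fun k => pvConv n k) := by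
  unfold chern_classes_quadric_alt
  rw [if_neg (by omega)]
  rw [portB_invariant n n le_rfl]

-- ===== VERDICT (by name: the statement is the Claim_ definition above) =====
theorem chern_classes_quadric_spec : Claim_equal_chern_classes_quadric := by
  intro dim _
  unfold Spec_chern_classes_quadric
  by_cases h : dim < 0
  · unfold chern_classes_quadric chern_classes_quadric_alt
    rw [if_pos h]
    simp only
    rw [PySem.List.pyRange_one_eq_nil (by omega)]
    rfl
  · have hn : dim = (dim.toNat : Int) := by omega
    rw [hn, portA_eq, portB_eq]
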